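-- pv_equiv track=rewrite | github.com/tictechtown/crackingcodinginterview | 10 - Sorting and Searching/1011_peaks_and_valleys.py | sort_peak_and_valleys
-- ===== SOURCE A (Python) =====
-- def sort_peak_and_valleys(input: list[int]) -> list[int]:
--
--     arr = sorted(input)
--     valley_index = 0
--     peak_index = len(arr) - 1
--
--     output = []
--     use_peak = True
--     while valley_index <= peak_index:
--         if use_peak:
--             output.append(arr[peak_index])
--             peak_index -= 1
--         else:
--             output.append(arr[valley_index])
--             valley_index += 1
--         use_peak = not use_peak
--
--     return output
-- ===== SOURCE B (Python) =====
-- def sort_peak_and_valleys(input: list[int]) -> list[int]: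
--     arr = sorted(input)
--     mid = len(arr) // 2
--     valleys = arr[:mid]
--     peaks = arr[mid:][::-1]
--     output = []
--     for p, v in zip(peaks, valleys):
--         output.append(p)
--         output.append(v)
--     if len(peaks) > len(valleys):
--         output.append(peaks[-1])
--     return output
-- ===== Notes on version B (the rewrite author's own statement) =====
-- stated objective: simpler
-- what changed: Replaces the toggle-flag while loop over two converging indices with a split of the sorted list into halves (valleys ascending, upper half reversed as peaks) interleaved by a single zip, plus the leftover middle peak for odd lengths.
import Mathlib
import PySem

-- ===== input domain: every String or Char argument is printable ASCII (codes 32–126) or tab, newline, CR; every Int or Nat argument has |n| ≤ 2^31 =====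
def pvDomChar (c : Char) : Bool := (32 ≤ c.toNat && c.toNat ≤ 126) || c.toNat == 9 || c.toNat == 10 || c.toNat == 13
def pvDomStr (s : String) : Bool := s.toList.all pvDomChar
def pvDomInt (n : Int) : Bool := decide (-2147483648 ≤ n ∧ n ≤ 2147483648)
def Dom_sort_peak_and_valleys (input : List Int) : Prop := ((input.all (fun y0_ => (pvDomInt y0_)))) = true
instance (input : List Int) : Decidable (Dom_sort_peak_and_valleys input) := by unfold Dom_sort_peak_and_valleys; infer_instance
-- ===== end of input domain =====

-- B replaces A's toggle-flag while loop over two converging indices by slicing the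
-- sorted list into halves and interleaving them with one zip (objective: simpler).

-- ===== PORT A =====
-- the while loop: state (valley_index, peak_index, output, use_peak); the 'none'
-- branches of pyGet? are Python's IndexError, unreachable for the initial indices
def pvLoopA (arr : List Int) (v p : Int) (output : List Int) (use_peak : Bool) : List Int :=
  if h : v ≤ p then
    if use_peak then
      match PySem.List.pyGet? arr p with
      | some x => pvLoopA arr v (p - 1) (output ++ [x]) false
      | none => output
    else
      match PySem.List.pyGet? arr v with
      | some x => pvLoopA arr (v + 1) p (output ++ [x]) true
      | none => output
  else output
termination_by (p + 1 - v).toNat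
decreasing_by all_goals omega

def sort_peak_and_valleys (input : List Int) : List Int :=
  let arr := PySem.List.sorted input id false
  pvLoopA arr 0 (PySem.List.len arr - 1) [] true

-- ===== PORT B =====
-- everything after 'arr = sorted(input)' in Source B
def pvBcore (arr : List Int) : List Int :=
  let mid := PySem.Int.floordiv (PySem.List.len arr) 2
  let valleys := PySem.List.slice arr none (some mid)
  let peaks := match PySem.List.slice? (PySem.List.slice arr (some mid) none) none none (-1) with
    | some l => l
    | none => []
  let output := (List.zip peaks valleys).foldl (fun acc pv => acc ++ [pv.1, pv.2]) []
  if PySem.List.len valleys < PySem.List.len peaks then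
    match PySem.List.pyGet? peaks (-1) with
    | some x => output ++ [x]
    | none => output
  else output

def sort_peak_and_valleys_alt (input : List Int) : List Int :=
  pvBcore (PySem.List.sorted input id false)

-- ===== PRECONDITION & SPEC =====
def Spec_sort_peak_and_valleys (input : List Int) (out : List Int) : Prop := out = sort_peak_and_valleys_alt input
instance (input : List Int) (out : List Int) : Decidable (Spec_sort_peak_and_valleys input out) := by unfold Spec_sort_peak_and_valleys; infer_instance

-- ===== CLAIM (what is proved, stated in full; the proofs are below) =====
def Claim_equal_sort_peak_and_valleys : Prop := ∀ (input : List Int), Dom_sort_peak_and_valleys input → Spec_sort_peak_and_valleys input (sort_peak_and_valleys input)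

-- ===== LEMMAS AND PROOFS =====

-- common reference: take the last, then the first, of what remains, alternately
def pvS : List Int → List Int
  | [] => []
  | [x] => [x]
  | x :: y :: xs => (y :: xs).getLast (by simp) :: x :: pvS ((y :: xs).dropLast)
termination_by l => l.length
decreasing_by simp [List.length_dropLast]

lemma pvS_cons_concat (a b : Int) (m : List Int) :
    pvS (a :: (m ++ [b])) = b :: a :: pvS m := by
  cases m with
  | nil => simp [pvS]
  | cons c m' =>
    rw [show a :: (c :: m' ++ [b]) = a :: c :: (m' ++ [b]) by rfl]
    rw [pvS]
    congr 1
    · simp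
    · congr 1
      rw [show c :: (m' ++ [b]) = (c :: m') ++ [b] by rfl, List.dropLast_concat]

lemma pvBcore_normal (l : List Int) :
    pvBcore l =
      (if (l.take (l.length / 2)).length < ((l.drop (l.length / 2)).reverse).length
       then (List.zip ((l.drop (l.length / 2)).reverse) (l.take (l.length / 2))).flatMap
              (fun pv => [pv.1, pv.2]) ++ (l.drop (l.length / 2)).head?.toList
       else (List.zip ((l.drop (l.length / 2)).reverse) (l.take (l.length / 2))).flatMap
              (fun pv => [pv.1, pv.2])) := by
  have hmid : PySem.Int.floordiv ((l.length : Int)) 2 = ((l.length / 2 : Nat) : Int) := by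
    exact_mod_cast PySem.Int.floordiv_natCast l.length 2
  unfold pvBcore
  simp only [PySem.List.len_eq, hmid, PySem.List.slice_to_natCast,
    PySem.List.slice_from_natCast, PySem.List.slice?_none_none_neg_one,
    PySem.List.foldl_append_eq_flatMap (fun pv : Int × Int => [pv.1, pv.2]),
    PySem.List.pyGet?_neg_one, List.getLast?_reverse, Nat.cast_lt, List.nil_append]
  split_ifs with hcond
  · cases hgl : (l.drop (l.length / 2)).head? <;> simp [hgl]
  · rfl

lemma pvBcore_cons_concat (a b : Int) (m : List Int) :
    pvBcore (a :: (m ++ [b])) = b :: a :: pvBcore m := by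
  have hk : m.length / 2 ≤ m.length := Nat.div_le_self _ _
  rw [pvBcore_normal, pvBcore_normal]
  have hlen : (a :: (m ++ [b])).length = m.length + 2 := by simp
  rw [hlen]
  have hdiv : (m.length + 2) / 2 = m.length / 2 + 1 := by omega
  rw [hdiv]
  have htake : (a :: (m ++ [b])).take (m.length / 2 + 1) = a :: m.take (m.length / 2) := by
    simp [List.take_append_of_le_length hk]
  have hdrop2 : (a :: (m ++ [b])).drop (m.length / 2 + 1) = m.drop (m.length / 2) ++ [b] := by
    simp [List.drop_append_of_le_length hk]
  have hdroprev : ((a :: (m ++ [b])).drop (m.length / 2 + 1)).reverse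
      = b :: (m.drop (m.length / 2)).reverse := by
    rw [hdrop2]; simp
  rw [htake, hdroprev]
  by_cases hc : m.length / 2 < m.length - m.length / 2
  · obtain ⟨c, cs, hcs⟩ : ∃ c cs, m.drop (m.length / 2) = c :: cs := by
      cases hd : m.drop (m.length / 2) with
      | nil => exfalso; have := congrArg List.length hd; simp at this; omega
      | cons c cs => exact ⟨c, cs, rfl⟩
    have hcl := congrArg List.length hcs
    simp at hcl
    rw [if_pos (by simp [hcs]; omega), if_pos (by simp [hcs]; omega)]
    rw [hdrop2, hcs]
    simp
  · rw [if_neg (by simp; omega), if_neg (by simp; omega)]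
    simp

lemma pvBcore_eq_pvS : ∀ (l : List Int), pvBcore l = pvS l
  | [] => by simp [pvBcore_normal, pvS]
  | [x] => by simp [pvBcore_normal, pvS]
  | x :: y :: xs => by
    rcases List.eq_nil_or_concat (y :: xs) with h | ⟨m, b, h⟩
    · simp at h
    · rw [List.concat_eq_append] at h
      rw [h, pvBcore_cons_concat, pvS_cons_concat, pvBcore_eq_pvS m]
termination_by l => l.length
decreasing_by
  have := congrArg List.length h
  simp at this
  simp
  omega

lemma pvSeg_decomp (arr : List Int) (dv n : Nat) (h2 : 2 ≤ n) (hle : dv + n ≤ arr.length) :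
    (arr.drop dv).take n
      = (arr[dv]?).getD 0
        :: (((arr.drop (dv + 1)).take (n - 2)) ++ [(arr[dv + n - 1]?).getD 0]) := by
  obtain ⟨n', rfl⟩ : ∃ n', n = n' + 2 := ⟨n - 2, by omega⟩
  have hdv : dv < arr.length := by omega
  have hn' : n' < (arr.drop (dv + 1)).length := by simp; omega
  have hidx : dv + (n' + 2) - 1 = dv + 1 + n' := by omega
  rw [List.drop_eq_getElem_cons hdv, List.take_succ_cons]
  simp only [Nat.add_sub_cancel, hidx]
  rw [List.getElem?_eq_getElem hdv,
      List.getElem?_eq_getElem (show dv + 1 + n' < arr.length from by omega)]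
  rw [List.take_add_one, List.getElem?_eq_getElem hn']
  simp [List.getElem_drop]

lemma pvLoopA_eq (arr : List Int) : ∀ (n : Nat) (v p : Int) (out : List Int),
    (p + 1 - v).toNat = n → 0 ≤ v → p < (arr.length : Int) →
    pvLoopA arr v p out true = out ++ pvS ((arr.drop v.toNat).take n) := by
  intro n
  induction n using Nat.strong_induction_on with
  | _ n ih =>
    intro v p out hn hv hp
    by_cases hvp : v ≤ p
    · have hp0 : 0 ≤ p := le_trans hv hvp
      have hplen : p.toNat < arr.length := by omega
      have hgetp : PySem.List.pyGet? arr p = some ((arr[p.toNat]?).getD 0) := by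
        rw [PySem.List.pyGet?_of_nonneg _ hp0, List.getElem?_eq_getElem hplen]
        simp
      rw [pvLoopA, dif_pos hvp]
      simp only [hgetp]
      by_cases hvp2 : v ≤ p - 1
      · have hvlen : v.toNat < arr.length := by omega
        have hgetv : PySem.List.pyGet? arr v = some ((arr[v.toNat]?).getD 0) := by
          rw [PySem.List.pyGet?_of_nonneg _ hv, List.getElem?_eq_getElem hvlen]
          simp
        rw [pvLoopA, dif_pos hvp2]
        simp only [hgetv]
        rw [ih (n - 2) (by omega) (v + 1) (p - 1) _ (by omega) (by omega) (by omega)]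
        rw [pvSeg_decomp arr v.toNat n (by omega) (by omega)]
        rw [pvS_cons_concat]
        have h1 : (v + 1).toNat = v.toNat + 1 := by omega
        have h2 : v.toNat + n - 1 = p.toNat := by omega
        rw [h1, h2]
        simp
      · have hn1 : n = 1 := by omega
        have hvlen : v.toNat < arr.length := by omega
        have hvp3 : v.toNat = p.toNat := by omega
        rw [pvLoopA, dif_neg hvp2]
        have hseg : (arr.drop v.toNat).take 1 = [(arr[v.toNat]?).getD 0] := by
          rw [show (1 : Nat) = 0 + 1 from rfl, List.take_add_one, List.take_zero]
          simp [List.getElem?_drop, List.getElem?_eq_getElem hvlen]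
        rw [hn1, hseg]
        simp only [pvS, hvp3]
        simp
    · have hn0 : n = 0 := by omega
      rw [pvLoopA, dif_neg hvp]
      simp [hn0, pvS]

-- ===== VERDICT (by name: the statement is the Claim_ definition above) =====
theorem sort_peak_and_valleys_spec : Claim_equal_sort_peak_and_valleys := by
  intro input _
  unfold Spec_sort_peak_and_valleys sort_peak_and_valleys sort_peak_and_valleys_alt
  set arr := PySem.List.sorted input id false with harr
  rw [pvBcore_eq_pvS]
  have h := pvLoopA_eq arr arr.length 0 ((arr.length : Int) - 1) [] (by simp) le_rfl (by omega)
  simp [PySem.List.len_eq] at h ⊢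
  simpa using h
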